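-- pv_equiv track=rewrite | github.com/engkimo/cafe | server/core/mcp/server.py | _match_uri_template
-- ===== SOURCE A (Python) =====
-- def _match_uri_template(template: str, uri: str) -> bool:
--     """URIテンプレートとURIのマッチング"""
--     template_parts = template.split('/')
--     uri_parts = uri.split('/')
--
--     if len(template_parts) != len(uri_parts):
--         return False
--
--     for t, u in zip(template_parts, uri_parts):
--         if t.startswith('{') and t.endswith('}'):
--             continue
--         if t != u:
--             return False
--
--     return True
-- ===== SOURCE B (Python) =====
-- def _first_seg(cs):
--     for i, c in enumerate(cs):
--         if c == '/':
--             return cs[:i], cs[i + 1:]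
--     return cs, None
--
--
-- def _match_uri_template(template: str, uri: str) -> bool:
--     """Single pass over both strings, segment by segment, without building part lists."""
--     ts, us = list(template), list(uri)
--     while True:
--         tseg, ts = _first_seg(ts)
--         useg, us = _first_seg(us)
--         wild = len(tseg) >= 2 and tseg[0] == '{' and tseg[-1] == '}'
--         if not (wild or tseg == useg):
--             return False
--         if ts is None or us is None:
--             return ts is None and us is None
-- ===== Notes on version B (the rewrite author's own statement) =====
-- stated objective: alternative
-- what changed: Instead of splitting both strings into part lists, checking lengths and zipping, B walks both strings in lockstep, peeling one '/'-delimited segment at a time and comparing (or skipping a {..} wildcard) as it goes, stopping early on the first mismatch.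
import Mathlib
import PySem

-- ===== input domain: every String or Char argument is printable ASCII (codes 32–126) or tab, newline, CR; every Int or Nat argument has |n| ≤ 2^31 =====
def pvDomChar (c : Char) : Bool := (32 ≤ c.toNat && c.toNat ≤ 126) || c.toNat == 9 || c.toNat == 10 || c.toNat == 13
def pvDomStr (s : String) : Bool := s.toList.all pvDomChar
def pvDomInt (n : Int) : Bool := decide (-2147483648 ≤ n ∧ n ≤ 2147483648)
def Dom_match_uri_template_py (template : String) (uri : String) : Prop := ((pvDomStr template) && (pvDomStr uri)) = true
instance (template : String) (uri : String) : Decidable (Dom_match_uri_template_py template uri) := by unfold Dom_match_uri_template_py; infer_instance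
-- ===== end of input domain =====

-- B replaces split/length-check/zip-loop with a lockstep segment-by-segment walk over both strings (alternative decomposition, same cost).

-- ===== PORT A =====
-- the for-loop over zip(template_parts, uri_parts) with continue / early return False
def pvLoopA : List (List Char × List Char) → Bool
  | [] => true
  | (t, u) :: rest =>
    if PySem.Chars.startswith t ['{'] && PySem.Chars.endswith t ['}'] then pvLoopA rest
    else if t ≠ u then false
    else pvLoopA rest

def match_uri_template_py (template : String) (uri : String) : Bool :=
  let template_parts := PySem.Chars.splitOn template.toList ['/']
  let uri_parts := PySem.Chars.splitOn uri.toList ['/']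
  if template_parts.length ≠ uri_parts.length then false
  else pvLoopA (template_parts.zip uri_parts)

-- ===== PORT B =====
-- _first_seg: characters before the first '/', and the rest after it (none if no '/')
def pvFirstSeg : List Char → List Char × Option (List Char)
  | [] => ([], none)
  | c :: rest =>
    if c = '/' then ([], some rest)
    else ((c :: (pvFirstSeg rest).1), (pvFirstSeg rest).2)

-- len(seg) >= 2 and seg[0] == '{' and seg[-1] == '}'
def pvWild (seg : List Char) : Bool :=
  decide (2 ≤ seg.length) && decide (seg.head? = some '{') && decide (seg.getLast? = some '}')

theorem pvFirstSeg_some_lt : ∀ (cs seg r : List Char), pvFirstSeg cs = (seg, some r) → r.length < cs.length := by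
  intro cs
  induction cs with
  | nil => intro seg r h; simp [pvFirstSeg] at h
  | cons c rest ih =>
    intro seg r h
    by_cases hc : c = '/'
    · simp [pvFirstSeg, hc] at h
      simp [← h.2]
    · simp [pvFirstSeg, hc] at h
      rcases h with ⟨-, h2⟩
      have := ih (pvFirstSeg rest).1 r (by rw [← h2])
      simp at this ⊢
      omega

-- the while-loop of B: peel one segment from each side, compare, recurse on the rests
def pvGo (ts us : List Char) : Bool :=
  match hts : pvFirstSeg ts, pvFirstSeg us with
  | (tseg, tr), (useg, ur) =>
    if !(pvWild tseg || tseg == useg) then false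
    else
      match htr : tr, ur with
      | some tr', some ur' => pvGo tr' ur'
      | none, none => true
      | _, _ => false
termination_by ts.length
decreasing_by exact pvFirstSeg_some_lt ts tseg tr' (by rw [hts])

def match_uri_template_py_alt (template : String) (uri : String) : Bool :=
  pvGo template.toList uri.toList

-- ===== PRECONDITION & SPEC =====
def Spec_match_uri_template_py (template : String) (uri : String) (out : Bool) : Prop := out = match_uri_template_py_alt template uri
instance (template : String) (uri : String) (out : Bool) : Decidable (Spec_match_uri_template_py template uri out) := by unfold Spec_match_uri_template_py; infer_instance

-- ===== CLAIM (what is proved, stated in full; the proofs are below) =====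
def Claim_equal_match_uri_template_py : Prop := ∀ (template : String) (uri : String), Dom_match_uri_template_py template uri → Spec_match_uri_template_py template uri (match_uri_template_py template uri)

-- ===== LEMMAS AND PROOFS =====

-- clean recursive description of splitting on '/'
def pvSegs : List Char → List (List Char)
  | [] => [[]]
  | c :: rest =>
    if c = '/' then [] :: pvSegs rest
    else match pvSegs rest with
      | s :: ss => (c :: s) :: ss
      | [] => [[c]]

def pvConsHead (p : List Char) : List (List Char) → List (List Char)
  | [] => [p]
  | s :: ss => (p ++ s) :: ss

theorem pvSegs_ne_nil (cs : List Char) : pvSegs cs ≠ [] := by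
  cases cs with
  | nil => simp [pvSegs]
  | cons c rest =>
    simp only [pvSegs]
    split
    · simp
    · split <;> simp

theorem splitOn_go_spec : ∀ (fuel : Nat) (l cur : List Char) (acc : List (List Char)),
    l.length < fuel →
    PySem.Chars.splitOn.go ['/'] fuel l cur acc = acc.reverse ++ pvConsHead cur.reverse (pvSegs l) := by
  intro fuel
  induction fuel with
  | zero => intro l cur acc h; omega
  | succ f ih =>
    intro l cur acc h
    cases l with
    | nil => simp [PySem.Chars.splitOn.go, pvSegs, pvConsHead]
    | cons c rest =>
      by_cases hc : c = '/'
      · subst hc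
        simp only [PySem.Chars.splitOn.go, List.isPrefixOf, beq_self_eq_true, Bool.true_and,
          List.isPrefixOf_nil_left, if_true, List.length_cons, List.drop_succ_cons, List.drop_zero, List.length_nil]
        rw [ih rest [] ((cur.reverse) :: acc) (by simp at h; omega)]
        simp only [pvSegs, pvConsHead, List.reverse_nil, List.reverse_cons, List.append_assoc,
          List.singleton_append, List.nil_append, List.cons_append, if_true]
        cases hsr : pvSegs rest with
        | nil => exact absurd hsr (pvSegs_ne_nil rest)
        | cons s ss => simp [pvConsHead]
      · simp only [PySem.Chars.splitOn.go, List.isPrefixOf, List.isPrefixOf_nil_left, Bool.and_true]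
        have hbeq : (('/' : Char) == c) = false := by simp [hc]; exact fun h' => hc h'.symm
        rw [hbeq]
        simp only [if_false, Bool.false_eq_true]
        rw [ih rest (c :: cur) acc (by simp at h ⊢; omega)]
        congr 1
        simp only [List.reverse_cons, pvSegs]
        rw [if_neg hc]
        cases hsr : pvSegs rest with
        | nil => exact absurd hsr (pvSegs_ne_nil rest)
        | cons s ss => simp [pvConsHead]

theorem splitOn_eq (cs : List Char) : PySem.Chars.splitOn cs ['/'] = pvSegs cs := by
  unfold PySem.Chars.splitOn
  rw [splitOn_go_spec (cs.length + 1) cs [] [] (by omega)]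
  cases hsr : pvSegs cs with
  | nil => exact absurd hsr (pvSegs_ne_nil cs)
  | cons s ss => simp [pvConsHead]

theorem segs_firstSeg (cs : List Char) :
    pvSegs cs = (match pvFirstSeg cs with
      | (seg, none) => [seg]
      | (seg, some r) => seg :: pvSegs r) := by
  induction cs with
  | nil => simp [pvSegs, pvFirstSeg]
  | cons c rest ih =>
    by_cases hc : c = '/'
    · simp [pvSegs, pvFirstSeg, hc]
    · simp only [pvSegs, pvFirstSeg, if_neg hc]
      rw [ih]
      cases hr : pvFirstSeg rest with
      | mk seg opt =>
        cases opt with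
        | none => simp
        | some r => simp

theorem prefix_single (l : List Char) (c : Char) : [c].isPrefixOf l = decide (l.head? = some c) := by
  cases l with
  | nil => simp [List.isPrefixOf]
  | cons a r =>
    simp only [List.isPrefixOf, List.isPrefixOf_nil_left, Bool.and_true, List.head?_cons]
    simp [beq_eq_decide, eq_comm]

theorem startswith_head (t : List Char) :
    PySem.Chars.startswith t ['{'] = decide (t.head? = some '{') := by
  simp only [PySem.Chars.startswith]
  exact prefix_single t '{'

theorem endswith_last (t : List Char) :
    PySem.Chars.endswith t ['}'] = decide (t.getLast? = some '}') := by
  simp only [PySem.Chars.endswith, List.isSuffixOf]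
  rw [show (['}'] : List Char).reverse = ['}'] from rfl]
  rw [prefix_single t.reverse '}']
  simp [List.head?_reverse]

theorem wild_eq (t : List Char) :
    (PySem.Chars.startswith t ['{'] && PySem.Chars.endswith t ['}']) = pvWild t := by
  cases t with
  | nil => simp [startswith_head, endswith_last, pvWild]
  | cons a r =>
    cases r with
    | nil =>
      simp [startswith_head, endswith_last, pvWild]
      rintro rfl h
      exact absurd h (by decide)
    | cons b r' =>
      simp only [startswith_head, endswith_last, pvWild]
      have h2 : (2 ≤ (a :: b :: r').length) := by simp
      simp [h2]

theorem pvGo_unfold (ts us : List Char) :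
    pvGo ts us =
      (if !(pvWild (pvFirstSeg ts).1 || (pvFirstSeg ts).1 == (pvFirstSeg us).1) then false
       else
         match (pvFirstSeg ts).2, (pvFirstSeg us).2 with
         | some tr', some ur' => pvGo tr' ur'
         | none, none => true
         | _, _ => false) := by
  rw [pvGo.eq_def]
  split
  rename_i tseg tr useg ur hts hus
  conv_rhs => rw [hts, hus]
  cases tr <;> cases ur <;> rfl

theorem pvLoopA_cons (t u : List Char) (rest : List (List Char × List Char)) :
    pvLoopA ((t, u) :: rest) = if pvWild t || t == u then pvLoopA rest else false := by
  simp only [pvLoopA, wild_eq]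
  by_cases hw : pvWild t = true
  · simp [hw]
  · simp only [Bool.not_eq_true] at hw
    simp only [hw, if_false, Bool.false_or]
    by_cases he : t = u
    · simp [he]
    · simp [he]

theorem core_eq : ∀ (n : Nat) (ts us : List Char), ts.length ≤ n →
    (if (pvSegs ts).length ≠ (pvSegs us).length then false
     else pvLoopA ((pvSegs ts).zip (pvSegs us))) = pvGo ts us := by
  intro n
  induction n with
  | zero =>
    intro ts us h
    have hts0 : ts = [] := List.eq_nil_of_length_eq_zero (Nat.le_zero.mp h)
    subst hts0
    rw [pvGo_unfold]
    rcases hus : pvFirstSeg us with ⟨useg, ur⟩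
    have hsegt : pvSegs [] = [([] : List Char)] := rfl
    cases ur with
    | none =>
      have hsegu : pvSegs us = [useg] := by rw [segs_firstSeg us, hus]
      rw [hsegt, hsegu, List.zip_cons_cons, pvLoopA_cons]
      cases hcond : (pvWild [] || [] == useg) <;>
        (simp [hcond, pvLoopA, pvFirstSeg]) <;>
        (simp only [Bool.or_eq_false_iff, Bool.or_eq_true_iff, beq_iff_eq, beq_eq_false_iff_ne, ne_eq] at hcond; tauto)
    | some r =>
      have hsegu : pvSegs us = useg :: pvSegs r := by rw [segs_firstSeg us, hus]
      rw [hsegt, hsegu]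
      have hne := pvSegs_ne_nil r
      have hlen : ([([] : List Char)]).length ≠ (useg :: pvSegs r).length := by
        simp
        cases hsr : pvSegs r with
        | nil => exact absurd hsr hne
        | cons s ss => simp
      rw [if_pos hlen]
      cases hcond : (pvWild [] || [] == useg) <;> simp [hcond, pvFirstSeg]
  | succ m ih =>
    intro ts us h
    rw [pvGo_unfold]
    rcases hts : pvFirstSeg ts with ⟨tseg, tr⟩
    rcases hus : pvFirstSeg us with ⟨useg, ur⟩
    cases tr with
    | none =>
      have hsegt : pvSegs ts = [tseg] := by rw [segs_firstSeg ts, hts]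
      cases ur with
      | none =>
        have hsegu : pvSegs us = [useg] := by rw [segs_firstSeg us, hus]
        rw [hsegt, hsegu, List.zip_cons_cons, pvLoopA_cons]
        cases hcond : (pvWild tseg || tseg == useg) <;>
        (simp [hcond, pvLoopA, pvFirstSeg]) <;>
        (simp only [Bool.or_eq_false_iff, Bool.or_eq_true_iff, beq_iff_eq, beq_eq_false_iff_ne, ne_eq] at hcond; tauto)
      | some r =>
        have hsegu : pvSegs us = useg :: pvSegs r := by rw [segs_firstSeg us, hus]
        rw [hsegt, hsegu]
        have hne := pvSegs_ne_nil r
        have hlen : ([tseg]).length ≠ (useg :: pvSegs r).length := by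
          simp
          cases hsr : pvSegs r with
          | nil => exact absurd hsr hne
          | cons s ss => simp
        rw [if_pos hlen]
        cases hcond : (pvWild tseg || tseg == useg) <;> simp [hcond]
    | some tr' =>
      have hsegt : pvSegs ts = tseg :: pvSegs tr' := by rw [segs_firstSeg ts, hts]
      cases ur with
      | none =>
        have hsegu : pvSegs us = [useg] := by rw [segs_firstSeg us, hus]
        rw [hsegt, hsegu]
        have hne := pvSegs_ne_nil tr'
        have hlen : (tseg :: pvSegs tr').length ≠ ([useg]).length := by
          simp
          cases hsr : pvSegs tr' with
          | nil => exact absurd hsr hne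
          | cons s ss => simp
        rw [if_pos hlen]
        cases hcond : (pvWild tseg || tseg == useg) <;> simp [hcond]
      | some ur' =>
        have hsegu : pvSegs us = useg :: pvSegs ur' := by rw [segs_firstSeg us, hus]
        rw [hsegt, hsegu]
        have hlt : tr'.length ≤ m := by
          have := pvFirstSeg_some_lt ts tseg tr' hts
          omega
        have hih := ih tr' ur' hlt
        by_cases hlen : (pvSegs tr').length = (pvSegs ur').length
        · have hlen' : ¬ (tseg :: pvSegs tr').length ≠ (useg :: pvSegs ur').length := by simp [hlen]
          rw [if_neg hlen', List.zip_cons_cons, pvLoopA_cons]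
          cases hcond : (pvWild tseg || tseg == useg)
          · simp [hcond]
          · simp [hcond]
            rw [← hih, if_neg (not_not_intro hlen)]
        · have hlen' : (tseg :: pvSegs tr').length ≠ (useg :: pvSegs ur').length := by
            simp [hlen]
          rw [if_pos hlen']
          have hgo : pvGo tr' ur' = false := by
            rw [← hih, if_pos hlen]
          cases hcond : (pvWild tseg || tseg == useg) <;> simp [hcond, hgo]

-- ===== VERDICT (by name: the statement is the Claim_ definition above) =====
theorem match_uri_template_py_spec : Claim_equal_match_uri_template_py := by
  intro template uri _
  unfold Spec_match_uri_template_py match_uri_template_py match_uri_template_py_alt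
  simp only [splitOn_eq]
  exact core_eq template.toList.length template.toList uri.toList (le_refl _)
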